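-- pv_equiv track=rewrite | github.com/melissa3000/Code-Challenges | frog_jump.py | solution
-- ===== SOURCE A (Python) =====
-- def solution(a):
--
--     if len(a) == 0:
--         return -1
--
--     i = 0
--     seen = set()
--
--
--     while i not in seen:
--         seen.add(i)
--         i += a[i]
--         if not 0 <= i < len(a):
--             return len(seen)
--     return -1
-- ===== SOURCE B (Python) =====
-- def solution(a):
--     n = len(a)
--     if n == 0:
--         return -1
--     i = 0
--     for step in range(n):
--         i += a[i]
--         if not 0 <= i < n:
--             return step + 1
--     return -1
-- ===== Notes on version B (the rewrite author's own statement) =====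
-- stated objective: simpler
-- what changed: Replaces the seen-set with a bounded for-loop: since the walk visits distinct cells until its first revisit, n steps suffice, so cycle detection becomes an iteration bound and the step counter replaces len(seen).
import Mathlib
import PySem

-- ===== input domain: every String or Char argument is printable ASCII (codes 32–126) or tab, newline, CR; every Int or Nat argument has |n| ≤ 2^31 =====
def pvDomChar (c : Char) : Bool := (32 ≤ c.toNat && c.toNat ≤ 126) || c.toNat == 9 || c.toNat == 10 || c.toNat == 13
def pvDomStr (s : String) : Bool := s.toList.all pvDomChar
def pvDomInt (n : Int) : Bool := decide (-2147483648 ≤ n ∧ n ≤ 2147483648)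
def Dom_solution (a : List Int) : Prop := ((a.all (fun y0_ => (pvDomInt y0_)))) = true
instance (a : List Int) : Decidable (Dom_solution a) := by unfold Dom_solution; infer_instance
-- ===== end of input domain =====

-- B replaces A's seen-set with a bounded for-loop (at most len(a) steps before a revisit),
-- the step counter replacing len(seen): simpler and O(1) extra space, same return value.

-- ===== PORT A =====
-- A's while loop: fuel a.length+1 is a totalisation guard only — the proof shows it never
-- runs out (seen grows by one distinct in-range index per iteration, so ≤ len(a)+1 entries).
-- a[i] is only ever read with 0 ≤ i < len(a) (checked before looping), so pyGet? is some
-- there and the `.getD 0` default is never the result.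
def runA (a : List Int) : Nat → Int → PySem.Set Int → Int
  | 0, _, _ => -1
  | fuel + 1, i, seen =>
    if PySem.Set.contains seen i then -1
    else
      let seen' := PySem.Set.add seen i
      let i' := i + (PySem.List.pyGet? a i).getD 0
      if ¬ (0 ≤ i' ∧ i' < (a.length : Int)) then (PySem.Set.len seen' : Int)
      else runA a fuel i' seen'

def solution (a : List Int) : Int :=
  if a.length = 0 then -1
  else runA a (a.length + 1) 0 PySem.Set.empty

-- ===== PORT B =====
-- B's `for step in range(n)` with early return; recursion on the remaining steps.
def runB (a : List Int) (i : Int) (step : Nat) : Int :=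
  if step < a.length then
    let i' := i + (PySem.List.pyGet? a i).getD 0
    if ¬ (0 ≤ i' ∧ i' < (a.length : Int)) then (step : Int) + 1
    else runB a i' (step + 1)
  else -1
termination_by a.length - step

def solution_alt (a : List Int) : Int :=
  if a.length = 0 then -1
  else runB a 0 0

-- ===== PRECONDITION & SPEC =====
def Spec_solution (a : List Int) (out : Int) : Prop := out = solution_alt a
instance (a : List Int) (out : Int) : Decidable (Spec_solution a out) := by unfold Spec_solution; infer_instance

-- ===== CLAIM (what is proved, stated in full; the proofs are below) =====
def Claim_equal_solution : Prop := ∀ (a : List Int), Dom_solution a → Spec_solution a (solution a)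

-- ===== LEMMAS AND PROOFS =====

-- the successor of j in the jump walk
def nxt (a : List Int) (j : Int) : Int := j + (PySem.List.pyGet? a j).getD 0

-- index in bounds
def InB (a : List Int) (i : Int) : Prop := 0 ≤ i ∧ i < (a.length : Int)

-- the visited set is closed under the walk, except for the edge leading to the current index
def Closed (a : List Int) (S : List Int) (i : Int) : Prop :=
  ∀ j ∈ S, nxt a j ∈ S ∨ nxt a j = i

-- pigeonhole: a duplicate-free list of in-bounds indices has at most a.length elements
theorem length_le_of_nodup_inb (a : List Int) (S : List Int) (hnd : S.Nodup)
    (hb : ∀ j ∈ S, InB a j) : S.length ≤ a.length := by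
  have hmap : (S.map Int.toNat).Nodup := by
    refine List.Nodup.map_on ?_ hnd
    intro x hx y hy hxy
    have hx' := hb x hx; have hy' := hb y hy
    unfold InB at hx' hy'; omega
  have hsub : (S.map Int.toNat) ⊆ List.range a.length := by
    intro x hx
    rcases List.mem_map.1 hx with ⟨j, hj, rfl⟩
    have := hb j hj; unfold InB at this
    simp only [List.mem_range]; omega
  have := (List.subperm_of_subset hmap hsub).length_le
  simpa using this

-- once the walk is inside a closed, in-bounds set, B never exits: runB returns -1
theorem runB_cycle (a : List Int) (S : List Int) (hb : ∀ j ∈ S, InB a j) :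
    ∀ step i, i ∈ S → Closed a S i → runB a i step = -1 := by
  have key : ∀ k step i, a.length - step ≤ k → i ∈ S → Closed a S i → runB a i step = -1 := by
    intro k
    induction k with
    | zero =>
      intro step i hk _ _
      rw [runB]
      have : ¬ step < a.length := by omega
      simp [this]
    | succ k ihk =>
      intro step i hk hi hci
      rw [runB]
      by_cases hlt : step < a.length
      · simp only [hlt, if_true]
        have hnext : nxt a i ∈ S := by
          rcases hci i hi with h | h
          · exact h
          · rw [h]; exact hi
        have hnb := hb _ hnext
        unfold InB at hnb
        have hcond : 0 ≤ i + (PySem.List.pyGet? a i).getD 0 ∧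
            i + (PySem.List.pyGet? a i).getD 0 < (a.length : Int) := by
          simpa only [nxt] using hnb
        simp only [if_neg (not_not_intro hcond)]
        exact ihk (step + 1) _ (by omega) hnext (by
          intro j hj
          rcases hci j hj with h | h
          · exact Or.inl h
          · exact Or.inl (h ▸ hi))
      · simp [hlt]
  exact fun step i hi hci => key (a.length - step) step i le_rfl hi hci

-- main simulation lemma: A with visited set S and fuel ≥ len(a)+1−|S| equals B at step |S|
theorem runA_eq_runB (a : List Int) :
    ∀ fuel S i, S.Nodup → (∀ j ∈ S, InB a j) → InB a i → Closed a S i →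
      a.length + 1 ≤ fuel + S.length →
      runA a fuel i S = runB a i S.length := by
  intro fuel
  induction fuel with
  | zero =>
    intro S i hnd hb _ _ hfuel
    have := length_le_of_nodup_inb a S hnd hb
    omega
  | succ fuel ih =>
    intro S i hnd hb hib hc hfuel
    by_cases hmem : i ∈ S
    · -- A detects the revisit and returns -1; B keeps walking inside S and also returns -1
      rw [runA]
      have : PySem.Set.contains S i = true := (PySem.Set.contains_iff S i).2 hmem
      simp only [this, if_true]
      exact (runB_cycle a S hb S.length i hmem hc).symm
    · have hcont : ¬ PySem.Set.contains S i = true := by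
        intro h; exact hmem ((PySem.Set.contains_iff S i).1 h)
      have hadd : PySem.Set.add S i = S ++ [i] := PySem.Set.add_of_not_mem hmem
      have hndadd : (S ++ [i]).Nodup := by
        simp only [List.nodup_append, List.nodup_cons, List.not_mem_nil, not_false_iff,
          List.nodup_nil, and_true, true_and]
        exact ⟨hnd, by intro x hx; simp; intro h; exact hmem (h ▸ hx)⟩
      have hbadd : ∀ j ∈ S ++ [i], InB a j := by
        intro j hj
        rcases List.mem_append.1 hj with h | h
        · exact hb j h
        · simp at h; exact h ▸ hib
      have hlen : S.length + 1 ≤ a.length := by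
        have := length_le_of_nodup_inb a (S ++ [i]) hndadd hbadd
        simpa using this
      rw [runA, runB]
      simp only [hcont, Nat.lt_iff_add_one_le.2 hlen, if_true]
      by_cases hout : ¬ (0 ≤ i + (PySem.List.pyGet? a i).getD 0 ∧
          i + (PySem.List.pyGet? a i).getD 0 < (a.length : Int))
      · simp only [hout, hadd, PySem.Set.len]
        simp
      · simp only [hout, if_false, hadd]
        have := ih (S ++ [i]) (i + (PySem.List.pyGet? a i).getD 0) hndadd hbadd
          (by unfold InB; omega) (by
            intro j hj
            rcases List.mem_append.1 hj with h | h
            · rcases hc j h with h' | h'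
              · exact Or.inl (List.mem_append.2 (Or.inl h'))
              · exact Or.inl (by simp [h'])
            · simp at h; subst h; exact Or.inr rfl)
          (by simpa using by omega)
        simpa using this

-- ===== VERDICT (by name: the statement is the Claim_ definition above) =====
theorem solution_spec : Claim_equal_solution := by
  intro a _
  unfold Spec_solution solution solution_alt
  by_cases h : a.length = 0
  · simp [h]
  · simp only [h, if_false]
    have := runA_eq_runB a (a.length + 1) PySem.Set.empty 0
      (by simp [PySem.Set.empty]) (by simp [PySem.Set.empty]) (by unfold InB; omega)
      (by intro j hj; simp [PySem.Set.empty] at hj) (by simp)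
    simpa [PySem.Set.empty] using this
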